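-- pv_equiv track=rewrite | github.com/absognety/Competitive-Coding-Platforms | interviewing.io/Salesforce/minNumbers.py | minimum_numbers2
-- ===== SOURCE A (Python) =====
-- def minimum_numbers2(arr,k):
--     result = 0
--     arr = sorted(arr,reverse=True)
--     while k > 0:
--         for a in arr:
--             if a <= k:
--                 k -= a
--                 result += 1
--                 break
--     return result
-- ===== SOURCE B (Python) =====
-- def minimum_numbers2(arr, k):
--     result = 0
--     for v in sorted({x for x in arr if x > 0}, reverse=True):
--         if k <= 0:
--             break
--         result += k // v
--         k %= v
--     return result
-- ===== Notes on version B (the rewrite author's own statement) =====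
-- stated objective: alternative
-- what changed: A repeatedly rescans the descending-sorted array subtracting the largest element <= k once per iteration (one iteration per unit of the answer); B makes a single descending pass over the distinct positive values, adding k // v and setting k %= v per value (fewer iterations by design; a timing run could not verify speed at scale since its large inputs fall outside Pre_).
-- outside the precondition, e.g. on minimum_numbers2([4, -10, -3, 14], 188): A returns 18, B returns 14; on minimum_numbers2([3], 5): A does not finish within the time limit, B returns 1; on minimum_numbers2([], 1): A does not finish within the time limit, B returns 0
import Mathlib
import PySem

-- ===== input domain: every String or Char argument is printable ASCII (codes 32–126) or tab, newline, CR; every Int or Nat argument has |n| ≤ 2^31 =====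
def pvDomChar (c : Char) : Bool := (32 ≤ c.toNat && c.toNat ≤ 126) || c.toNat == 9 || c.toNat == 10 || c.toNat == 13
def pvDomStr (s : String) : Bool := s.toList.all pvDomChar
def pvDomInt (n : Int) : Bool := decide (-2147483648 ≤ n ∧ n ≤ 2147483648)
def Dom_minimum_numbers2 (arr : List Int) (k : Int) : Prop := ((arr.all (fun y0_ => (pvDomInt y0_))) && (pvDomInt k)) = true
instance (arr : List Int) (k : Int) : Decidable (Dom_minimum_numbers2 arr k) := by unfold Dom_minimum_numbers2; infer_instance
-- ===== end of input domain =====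

-- B replaces A's repeated largest-subtraction loop (one pass over the array per unit of the answer)
-- by a single descending pass over the distinct positive values using k // v and k %= v; equivalence
-- is claimed on Pre_, the inputs where A terminates without ever selecting a non-positive element.

-- ===== PORT A =====
-- sorted(arr, reverse=True)
def pvSortDescA (arr : List Int) : List Int := PySem.List.sorted arr (fun x => x) true

-- the inner 'for a in arr: if a <= k: … break' — first element ≤ k, in list order
def pvFirstLE : List Int → Int → Option Int
  | [], _ => none
  | a :: rest, k => if a ≤ k then some a else pvFirstLE rest k

-- the 'while k > 0' loop; fuel-guarded for totality (inside Pre_ each pass subtracts a ≥ 1,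
-- so fuel k.toNat is never exhausted; the 'none' arm re-enters the while loop exactly as Python does)
def pvLoopA : Nat → List Int → Int → Int → Int
  | 0, _, _, res => res
  | fuel+1, l, k, res =>
    if 0 < k then
      match pvFirstLE l k with
      | some a => pvLoopA fuel l (k - a) (res + 1)
      | none => pvLoopA fuel l k res
    else res

def minimum_numbers2 (arr : List Int) (k : Int) : Int :=
  pvLoopA k.toNat (pvSortDescA arr) k 0

-- ===== PORT B =====
-- sorted({x for x in arr if x > 0}, reverse=True)
def pvDescPos (arr : List Int) : List Int :=
  PySem.List.sorted (PySem.Set.ofList (arr.filter (fun x => decide (0 < x)))) (fun x => x) true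

-- 'for v in …: if k <= 0: break; result += k // v; k %= v'
def pvLoopB : List Int → Int → Int → Int
  | [], _, res => res
  | v :: rest, k, res =>
    if k ≤ 0 then res
    else pvLoopB rest (PySem.Int.mod k v) (res + PySem.Int.floordiv k v)

def minimum_numbers2_alt (arr : List Int) (k : Int) : Int :=
  pvLoopB (pvDescPos arr) k 0

-- ===== PRECONDITION & SPEC =====
-- the chained Python-remainder of k by the distinct positive values in descending order
def pvChain (arr : List Int) (k : Int) : Int :=
  (pvDescPos arr).foldl (fun r v => PySem.Int.mod r v) k

-- Pre_ excludes the inputs with k > 0 whose descending chained remainder by the positive values is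
-- nonzero: there A's greedy gets stuck below every positive element and either loops forever or
-- terminates only by subtracting negative elements to push k back up, a pathological greedy outside
-- the problem's natural positive-numbers domain.
def Pre_minimum_numbers2 (arr : List Int) (k : Int) : Prop :=
  k ≤ 0 ∨ pvChain arr k = 0
instance (arr : List Int) (k : Int) : Decidable (Pre_minimum_numbers2 arr k) := by
  unfold Pre_minimum_numbers2; infer_instance

def pvWitness_minimum_numbers2 : List Int × Int := ([1, 3], 7)

def Spec_minimum_numbers2 (arr : List Int) (k : Int) (out : Int) : Prop := out = minimum_numbers2_alt arr k
instance (arr : List Int) (k : Int) (out : Int) : Decidable (Spec_minimum_numbers2 arr k out) := by unfold Spec_minimum_numbers2; infer_instance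

-- ===== CLAIM (what is proved, stated in full; the proofs are below) =====
def Claim_equal_minimum_numbers2 : Prop := ∀ (arr : List Int) (k : Int), Dom_minimum_numbers2 arr k → Pre_minimum_numbers2 arr k → Spec_minimum_numbers2 arr k (minimum_numbers2 arr k)

-- ===== LEMMAS AND PROOFS =====

theorem pvLoopA_nonpos (fuel : Nat) (l : List Int) (k res : Int) (hk : k ≤ 0) :
    pvLoopA fuel l k res = res := by
  cases fuel with
  | zero => rfl
  | succ f => simp [pvLoopA, show ¬ 0 < k by omega]

theorem pvLoopB_nonpos (P : List Int) (k res : Int) (hk : k ≤ 0) :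
    pvLoopB P k res = res := by
  cases P with
  | nil => rfl
  | cons v rest => simp [pvLoopB, hk]

theorem pvFirstLE_eq_max (k v : Int) : ∀ (L : List Int),
    L.Pairwise (fun a b => b ≤ a) → v ∈ L → v ≤ k → (∀ x ∈ L, x ≤ k → x ≤ v) →
    pvFirstLE L k = some v := by
  intro L
  induction L with
  | nil => intro _ hv; cases hv
  | cons a t ih =>
    intro hp hv hvk hub
    rw [List.pairwise_cons] at hp
    by_cases h : a ≤ k
    · have hav : a ≤ v := hub a (List.mem_cons_self) h
      have hva : v ≤ a := by
        rcases List.mem_cons.mp hv with rfl | hvt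
        · exact le_refl _
        · exact hp.1 v hvt
      simp only [pvFirstLE, if_pos h]
      exact congrArg some (le_antisymm hav hva)
    · have hvt : v ∈ t := by
        rcases List.mem_cons.mp hv with rfl | hvt
        · exact absurd hvk h
        · exact hvt
      simp only [pvFirstLE, if_neg h]
      exact ih hp.2 hvt hvk (fun x hx hxk => hub x (List.mem_cons_of_mem _ hx) hxk)

theorem pvMod_small (k v : Int) (h0 : 0 ≤ k) (hkv : k < v) : PySem.Int.mod k v = k := by
  rw [PySem.Int.mod_eq_emod_of_pos (by omega)]
  exact Int.emod_eq_of_lt h0 hkv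

theorem pvFloordiv_small (k v : Int) (h0 : 0 ≤ k) (hkv : k < v) : PySem.Int.floordiv k v = 0 := by
  rw [PySem.Int.floordiv_eq_ediv_of_pos (by omega)]
  exact Int.ediv_eq_zero_of_lt h0 hkv

theorem pvMod_sub (k v : Int) : PySem.Int.mod (k - v) v = PySem.Int.mod k v := by
  by_cases hv : 0 < v
  · rw [PySem.Int.mod_eq_emod_of_pos hv, PySem.Int.mod_eq_emod_of_pos hv,
      Int.sub_emod_right]
  · by_cases hv0 : v = 0
    · simp [hv0]
    · have h1 := PySem.Int.floordiv_mul_add_mod (k - v) v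
      have h2 := PySem.Int.floordiv_mul_add_mod k v
      have hb1 := PySem.Int.mod_neg_bounds (a:=k-v) (b:=v) (by omega)
      have hb2 := PySem.Int.mod_neg_bounds (a:=k) (b:=v) (by omega)
      -- both remainders lie in (v, 0] and differ by a multiple of v, so they are equal
      have hq : (PySem.Int.floordiv (k - v) v + 1 - PySem.Int.floordiv k v) * v
          = PySem.Int.mod k v - PySem.Int.mod (k - v) v := by linear_combination h1 - h2
      have hq0 : PySem.Int.floordiv (k - v) v + 1 - PySem.Int.floordiv k v = 0 := by
        by_contra hne
        rcases lt_or_gt_of_ne hne with hlt | hgt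
        · nlinarith [hq, hb1.1, hb1.2, hb2.1, hb2.2]
        · nlinarith [hq, hb1.1, hb1.2, hb2.1, hb2.2]
      rw [hq0, zero_mul] at hq
      omega

theorem pvLoopB_sub (v : Int) (rest : List Int) (k res : Int) (hv : 1 ≤ v) (hvk : v ≤ k) :
    pvLoopB (v :: rest) (k - v) (res + 1) = pvLoopB (v :: rest) k res := by
  have hk0 : ¬ k ≤ 0 := by omega
  by_cases h : k - v ≤ 0
  · have hkv : k = v := by omega
    have hmod : PySem.Int.mod k v = 0 := by
      rw [hkv, PySem.Int.mod_eq_emod_of_pos (by omega)]; simp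
    have hdiv : PySem.Int.floordiv k v = 1 := by
      rw [hkv, PySem.Int.floordiv_eq_ediv_of_pos (by omega)]
      exact Int.ediv_self (by omega)
    simp [pvLoopB, h, hk0, hmod, hdiv, pvLoopB_nonpos rest 0 _ (le_refl 0)]
  · have hdiv : PySem.Int.floordiv (k - v) v = PySem.Int.floordiv k v - 1 := by
      rw [PySem.Int.floordiv_eq_ediv_of_pos (by omega),
        PySem.Int.floordiv_eq_ediv_of_pos (by omega)]
      have : k - v = k + (-1) * v := by ring
      rw [this, Int.add_mul_ediv_right _ _ (by omega : v ≠ 0)]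
      ring
    simp only [pvLoopB, if_neg h, if_neg hk0, pvMod_sub, hdiv]
    congr 1
    ring

theorem pvMain (arr : List Int) : ∀ (n : Nat) (P : List Int) (k res : Int) (fuel : Nat),
    P.Pairwise (· > ·) →
    (∀ v ∈ P, 1 ≤ v) →
    (∀ v ∈ P, v ∈ arr) →
    (∀ x ∈ arr, 1 ≤ x → x ≤ k → x ∈ P) →
    (k ≤ 0 ∨ P.foldl (fun r v => PySem.Int.mod r v) k = 0) →
    k.toNat + P.length ≤ n →
    k.toNat ≤ fuel →
    pvLoopA fuel (pvSortDescA arr) k res = pvLoopB P k res := by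
  intro n
  induction n with
  | zero =>
    intro P k res fuel _ _ _ _ _ hn _
    have hP : P = [] := by
      cases P with
      | nil => rfl
      | cons a t => simp at hn
    have hk : k ≤ 0 := by omega
    rw [hP, pvLoopA_nonpos _ _ _ _ hk]; rfl
  | succ m ih =>
    intro P k res fuel hpair hpos hmem hall hchain hn hfuel
    by_cases hk : k ≤ 0
    · rw [pvLoopA_nonpos _ _ _ _ hk, pvLoopB_nonpos _ _ _ hk]
    · have hk' : 0 < k := by omega
      cases P with
      | nil =>
        simp only [List.foldl_nil] at hchain
        omega
      | cons v rest =>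
        have hv1 : 1 ≤ v := hpos v (List.mem_cons_self)
        rw [List.pairwise_cons] at hpair
        by_cases hkv : k < v
        · -- v > k: this pass contributes nothing; drop v
          have hmod : PySem.Int.mod k v = k := pvMod_small k v (by omega) hkv
          have hdiv : PySem.Int.floordiv k v = 0 := pvFloordiv_small k v (by omega) hkv
          have hrec := ih rest k res fuel hpair.2
            (fun x hx => hpos x (List.mem_cons_of_mem _ hx))
            (fun x hx => hmem x (List.mem_cons_of_mem _ hx))
            (fun x hx h1 hxk => by
              rcases List.mem_cons.mp (hall x hx h1 hxk) with rfl | h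
              · omega
              · exact h)
            (by
              rcases hchain with h | h
              · exact Or.inl h
              · right; simpa [hmod] using h)
            (by simp at hn ⊢; omega) hfuel
          rw [hrec]
          simp [pvLoopB, show ¬ k ≤ 0 by omega, hmod, hdiv]
        · -- v ≤ k: A picks v (the largest element ≤ k) once; B's division absorbs it
          have hvk : v ≤ k := by omega
          have hfind : pvFirstLE (pvSortDescA arr) k = some v := by
            apply pvFirstLE_eq_max
            · exact PySem.List.sorted_pairwise_rev arr (fun x => x) |>.imp (fun h => h)
            · rw [pvSortDescA, PySem.List.mem_sorted]
              exact hmem v (List.mem_cons_self)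
            · exact hvk
            · intro x hx hxk
              rw [pvSortDescA, PySem.List.mem_sorted] at hx
              by_cases h1 : 1 ≤ x
              · rcases List.mem_cons.mp (hall x hx h1 hxk) with rfl | h
                · exact le_refl _
                · exact le_of_lt (hpair.1 x h)
              · omega
          cases fuel with
          | zero => omega
          | succ f =>
            simp only [pvLoopA, if_pos hk', hfind]
            have hrec := ih (v :: rest) (k - v) (res + 1) f
              (List.pairwise_cons.mpr hpair) hpos hmem
              (fun x hx h1 hxk => hall x hx h1 (by omega))
              (by
                rcases hchain with h | h
                · omega
                · right; simp only [List.foldl_cons, pvMod_sub] at *; exact h)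
              (by simp at hn ⊢; omega)
              (by omega)
            rw [hrec, pvLoopB_sub v rest k res hv1 hvk]

theorem pvDescPos_pairwise (arr : List Int) : (pvDescPos arr).Pairwise (· > ·) := by
  have hle : (pvDescPos arr).Pairwise (fun a b => b ≤ a) :=
    (PySem.List.sorted_pairwise_rev _ (fun x => x)).imp (fun h => h)
  have hnd : (pvDescPos arr).Nodup :=
    ((PySem.List.sorted_perm _ _ _).nodup_iff).mpr (PySem.Set.nodup_ofList _)
  have := hle.and hnd
  exact this.imp (fun ⟨h1, h2⟩ => lt_of_le_of_ne h1 (by exact fun he => h2 he.symm))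

theorem pvDescPos_mem (arr : List Int) (v : Int) :
    v ∈ pvDescPos arr ↔ v ∈ arr ∧ 0 < v := by
  rw [pvDescPos, PySem.List.mem_sorted, PySem.Set.mem_ofList, List.mem_filter]
  simp

-- ===== VERDICT (by name: the statement is the Claim_ definition above) =====
theorem minimum_numbers2_spec : Claim_equal_minimum_numbers2 := by
  intro arr k _ hpre
  unfold Spec_minimum_numbers2 minimum_numbers2 minimum_numbers2_alt
  exact pvMain arr (k.toNat + (pvDescPos arr).length) (pvDescPos arr) k 0 k.toNat
    (pvDescPos_pairwise arr)
    (fun v hv => by have := (pvDescPos_mem arr v).mp hv; omega)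
    (fun v hv => ((pvDescPos_mem arr v).mp hv).1)
    (fun x hx h1 hxk => (pvDescPos_mem arr x).mpr ⟨hx, by omega⟩)
    hpre (le_refl _) (le_refl _)
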